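-- pv_equiv track=rewrite | github.com/hydev-a/truncyate | truncyate/utils.py | handle_abbreviations
-- ===== SOURCE A (Python) =====
-- def handle_abbreviations(text: str) -> str:
--     """
--     Process text to handle common abbreviations that might confuse sentence splitting.
--
--     Args:
--         text: The text to process
--
--     Returns:
--         Text with abbreviations handled
--     """
--     # Replace common abbreviations temporarily
--     common_abbrev = [
--         "Mr.", "Mrs.", "Ms.", "Dr.", "Prof.",
--         "Inc.", "Ltd.", "Co.", "Corp.",
--         "i.e.", "e.g.", "etc.", "vs.", "a.m.", "p.m."
--     ]
--
--     temp_text = text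
--     for abbr in common_abbrev:
--         # Replace period with a special marker
--         temp_text = temp_text.replace(abbr, abbr.replace(".", "<<DOT>>"))
--
--     return temp_text
-- ===== SOURCE B (Python) =====
-- import re
--
-- _ABBREVS = [
--     "Mr.", "Mrs.", "Ms.", "Dr.", "Prof.",
--     "Inc.", "Ltd.", "Co.", "Corp.",
--     "i.e.", "e.g.", "etc.", "vs.", "a.m.", "p.m."
-- ]
-- _REPL = {a: a.replace(".", "<<DOT>>") for a in _ABBREVS}
-- _RX = re.compile("|".join(re.escape(a) for a in _ABBREVS))
--
--
-- def handle_abbreviations(text: str) -> str: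
--     """
--     Process text to handle common abbreviations that might confuse sentence splitting.
--
--     Single left-to-right pass: one compiled alternation (in list order) replaces
--     each matched abbreviation by its precomputed marker form.
--     """
--     return _RX.sub(lambda m: _REPL[m.group(0)], text)
-- ===== Notes on version B (the rewrite author's own statement) =====
-- stated objective: idiomatic
-- what changed: A makes 15 sequential full-text str.replace passes (one per abbreviation); B precomputes a dict abbr->marker, compiles one regex alternation over the escaped abbreviations in list order, and does a single left-to-right re.sub pass whose callback looks the match up in the dict.
import Mathlib
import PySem

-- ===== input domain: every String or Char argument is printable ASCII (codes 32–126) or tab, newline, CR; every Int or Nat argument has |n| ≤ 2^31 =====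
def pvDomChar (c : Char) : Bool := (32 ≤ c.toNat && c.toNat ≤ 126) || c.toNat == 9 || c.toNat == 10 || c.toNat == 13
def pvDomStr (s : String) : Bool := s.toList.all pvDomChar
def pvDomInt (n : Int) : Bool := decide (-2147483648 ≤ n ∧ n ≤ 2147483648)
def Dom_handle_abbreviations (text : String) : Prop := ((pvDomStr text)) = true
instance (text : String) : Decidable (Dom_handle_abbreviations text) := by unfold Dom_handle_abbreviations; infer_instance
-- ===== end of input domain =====

-- B replaces A's 15 sequential full-text replace passes by ONE left-to-right scan with an
-- alternation tried in list order (the re.sub of Source B); alternative decomposition, no speed claim.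

-- ===== PORT A =====
def handle_abbreviations (text : String) : String :=
  let common_abbrev : List String :=
    ["Mr.", "Mrs.", "Ms.", "Dr.", "Prof.",
     "Inc.", "Ltd.", "Co.", "Corp.",
     "i.e.", "e.g.", "etc.", "vs.", "a.m.", "p.m."]
  common_abbrev.foldl
    (fun temp_text abbr => PySem.Str.replace temp_text abbr (PySem.Str.replace abbr "." "<<DOT>>"))
    text

-- ===== PORT B =====
-- hand-port of Source B's re.sub with a compiled alternation of literal (re.escape'd) patterns:
-- one left-to-right scan; at each position the alternatives are tried in list order; on a
-- match the dict of Source B yields the replacement and the scan resumes after the match.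
-- Exact for these literal, nonempty patterns.
def pvRegexSub (tbl : List (List Char × List Char)) : List Char → List Char
  | [] => []
  | c :: t =>
    match tbl.find? (fun pm => pm.1.isPrefixOf (c :: t)) with
    | some pm => pm.2 ++ pvRegexSub tbl (t.drop (pm.1.length - 1))
    | none => c :: pvRegexSub tbl t
termination_by l => l.length
decreasing_by
  · simp only [List.length_drop, List.length_cons]; omega
  · simp only [List.length_cons]; omega

def pvAbbrevs : List String :=
  ["Mr.", "Mrs.", "Ms.", "Dr.", "Prof.",
   "Inc.", "Ltd.", "Co.", "Corp.",
   "i.e.", "e.g.", "etc.", "vs.", "a.m.", "p.m."]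

-- the dict {abbr: abbr.replace(".", "<<DOT>>")} of Source B, keyed by the pattern
def pvTable : List (List Char × List Char) :=
  pvAbbrevs.map (fun a => (a.toList, (PySem.Str.replace a "." "<<DOT>>").toList))

def handle_abbreviations_alt (text : String) : String :=
  String.ofList (pvRegexSub pvTable text.toList)

-- ===== PRECONDITION & SPEC =====
def Spec_handle_abbreviations (text : String) (out : String) : Prop := out = handle_abbreviations_alt text
instance (text : String) (out : String) : Decidable (Spec_handle_abbreviations text out) := by unfold Spec_handle_abbreviations; infer_instance

-- ===== CLAIM (what is proved, stated in full; the proofs are below) =====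
def Claim_equal_handle_abbreviations : Prop := ∀ (text : String), Dom_handle_abbreviations text → Spec_handle_abbreviations text (handle_abbreviations text)

-- ===== LEMMAS AND PROOFS =====

-- q is a prefix of a ++ u only if q and a are prefix-comparable
theorem pv_prefix_append_cases {q a u : List Char} (h : q <+: a ++ u) : q <+: a ∨ a <+: q :=
  List.prefix_or_prefix_of_prefix h (List.prefix_append a u)

-- p cannot begin at any position inside the marker mq
def pvOkMark (p mq : List Char) : Bool :=
  (List.range mq.length).all (fun j => !(p.isPrefixOf (mq.drop j)) && !((mq.drop j).isPrefixOf p))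

-- q cannot begin strictly inside the pattern p
def pvOkPat (q p : List Char) : Bool :=
  (List.range p.length).all (fun j => j == 0 || (!(q.isPrefixOf (p.drop j)) && !((p.drop j).isPrefixOf q)))

-- no tail of p is prefix-comparable with the marker mq
def pvOkTail (p mq : List Char) : Bool :=
  (List.range p.length).all (fun d => !((p.drop d).isPrefixOf mq) && !(mq.isPrefixOf (p.drop d)))

-- non-interference of a new pattern p (and its marker) with a whole table
def pvOk (tbl : List (List Char × List Char)) (p : List Char) : Bool :=
  tbl.all (fun qm => pvOkMark p qm.2 && pvOkPat qm.1 p && pvOkTail p qm.2)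

-- every step of the chain is non-interfering with the table built so far
def pvChainOk : List (List Char × List Char) → List (List Char × List Char) → Bool
  | _, [] => true
  | done, pm :: rest => !pm.1.isEmpty && pvOk done pm.1 && pvChainOk (done ++ [pm]) rest

theorem pvRegexSub_nil_tbl : ∀ cs : List Char, pvRegexSub [] cs = cs := by
  intro cs
  induction cs with
  | nil => simp [pvRegexSub]
  | cons c t ih => rw [pvRegexSub]; simp [ih]

-- a segment none of whose positions can start a match is copied verbatim
theorem pvRegexSub_append (tbl : List (List Char × List Char)) :
    ∀ (s rest : List Char),
      (∀ j, j < s.length → ∀ pm ∈ tbl, ¬ pm.1 <+: (s.drop j ++ rest)) →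
      pvRegexSub tbl (s ++ rest) = s ++ pvRegexSub tbl rest := by
  intro s
  induction s with
  | nil => intro rest _; simp
  | cons c s' ih =>
    intro rest h
    have hnone : (tbl.find? (fun pm => pm.1.isPrefixOf (c :: (s' ++ rest)))) = none := by
      rw [List.find?_eq_none]
      intro pm hm
      have := h 0 (by simp) pm hm
      simpa [List.isPrefixOf_iff_prefix] using this
    rw [show (c :: s') ++ rest = c :: (s' ++ rest) from rfl]
    rw [pvRegexSub, hnone]
    rw [ih rest (by
      intro j hj pm hm
      have := h (j+1) (by simpa using Nat.succ_lt_succ hj) pm hm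
      simpa using this)]
    simp

-- no tail of p becomes a prefix of the scan's output unless it was a prefix of the input
theorem pvRegexSub_not_prefix (tbl : List (List Char × List Char)) (p : List Char)
    (hT : ∀ pm ∈ tbl, pvOkTail p pm.2 = true) :
    ∀ n, ∀ xs : List Char, xs.length ≤ n → ∀ d, d < p.length →
      ¬ (p.drop d) <+: xs → ¬ (p.drop d) <+: pvRegexSub tbl xs := by
  intro n
  induction n with
  | zero =>
    intro xs hlen d hd hq
    have hx : xs = [] := List.eq_nil_of_length_eq_zero (Nat.le_zero.mp hlen)
    subst hx
    simpa [pvRegexSub] using hq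
  | succ n ih =>
    intro xs hlen d hd hq
    match xs with
    | [] => simpa [pvRegexSub] using hq
    | c :: t =>
      cases hf : tbl.find? (fun pm => pm.1.isPrefixOf (c :: t)) with
      | some pm =>
        rw [pvRegexSub, hf]
        intro hpre
        have hmem : pm ∈ tbl := List.mem_of_find?_eq_some hf
        have hok := hT pm hmem
        unfold pvOkTail at hok
        rw [List.all_eq_true] at hok
        have hok' := hok d (by simpa using hd)
        simp only [Bool.and_eq_true, Bool.not_eq_true'] at hok'
        rcases pv_prefix_append_cases hpre with h1 | h1
        · have := List.isPrefixOf_iff_prefix.mpr h1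
          rw [hok'.1] at this; exact Bool.false_ne_true this
        · have := List.isPrefixOf_iff_prefix.mpr h1
          rw [hok'.2] at this; exact Bool.false_ne_true this
      | none =>
        rw [pvRegexSub, hf]
        intro hpre
        have hql : 0 < (p.drop d).length := by
          rw [List.length_drop]; omega
        match hqe : p.drop d with
        | [] => rw [hqe] at hql; simp at hql
        | q0 :: q' =>
          rw [hqe] at hpre
          rcases List.cons_prefix_cons.mp hpre with ⟨hc, hq'⟩
          subst hc
          have hq'' : q' = p.drop (d+1) := by
            have ht : (p.drop d).tail = p.drop (d+1) := List.tail_drop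
            rw [hqe] at ht; simpa using ht
          by_cases hdd : d + 1 < p.length
          · have hnq : ¬ (p.drop (d+1)) <+: t := by
              intro hh
              apply hq
              rw [hqe]
              exact List.cons_prefix_cons.mpr ⟨rfl, by rw [hq'']; exact hh⟩
            exact (ih t (by simp at hlen; omega) (d+1) hdd hnq) (by rw [← hq'']; exact hq')
          · have hnil : p.drop (d+1) = [] := List.drop_eq_nil_of_le (by omega)
            rw [hnil] at hq''
            apply hq
            rw [hqe, hq'']
            exact List.cons_prefix_cons.mpr ⟨rfl, List.nil_prefix⟩

-- one more replace pass over the scan's output = the scan with the pair appended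
theorem pvStep (tbl : List (List Char × List Char)) (p m : List Char) (hp : p ≠ [])
    (hOk : pvOk tbl p = true) :
    ∀ n, ∀ xs : List Char, xs.length ≤ n →
      pvRegexSub [(p, m)] (pvRegexSub tbl xs) = pvRegexSub (tbl ++ [(p, m)]) xs := by
  have hOk' := (List.all_eq_true).mp hOk
  have hMark : ∀ pm ∈ tbl, pvOkMark p pm.2 = true := by
    intro pm hm
    have := hOk' pm hm; simp only [Bool.and_eq_true] at this; exact this.1.1
  have hPat : ∀ pm ∈ tbl, pvOkPat pm.1 p = true := by
    intro pm hm
    have := hOk' pm hm; simp only [Bool.and_eq_true] at this; exact this.1.2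
  have hTail : ∀ pm ∈ tbl, pvOkTail p pm.2 = true := by
    intro pm hm
    have := hOk' pm hm; simp only [Bool.and_eq_true] at this; exact this.2
  intro n
  induction n with
  | zero =>
    intro xs hlen
    have hx : xs = [] := List.eq_nil_of_length_eq_zero (Nat.le_zero.mp hlen)
    subst hx
    simp [pvRegexSub]
  | succ n ih =>
    intro xs hlen
    match xs with
    | [] => simp [pvRegexSub]
    | c :: t =>
      cases hf : tbl.find? (fun pm => pm.1.isPrefixOf (c :: t)) with
      | some pm =>
        have hmem : pm ∈ tbl := List.mem_of_find?_eq_some hf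
        have hsk : ∀ u, pvRegexSub [(p, m)] (pm.2 ++ u) = pm.2 ++ pvRegexSub [(p, m)] u := by
          intro u
          apply pvRegexSub_append
          intro j hj qm hqm
          have hqm' : qm = (p, m) := by simpa using hqm
          subst hqm'
          intro hpre
          have hok := hMark pm hmem
          unfold pvOkMark at hok
          rw [List.all_eq_true] at hok
          have hok' := hok j (by simpa using hj)
          simp only [Bool.and_eq_true, Bool.not_eq_true'] at hok'
          rcases pv_prefix_append_cases hpre with h1 | h1
          · have := List.isPrefixOf_iff_prefix.mpr h1
            rw [hok'.1] at this; exact Bool.false_ne_true this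
          · have := List.isPrefixOf_iff_prefix.mpr h1
            rw [hok'.2] at this; exact Bool.false_ne_true this
        have hlen' : (t.drop (pm.1.length - 1)).length ≤ n := by
          rw [List.length_drop]; simp at hlen; omega
        calc pvRegexSub [(p, m)] (pvRegexSub tbl (c :: t))
            = pvRegexSub [(p, m)] (pm.2 ++ pvRegexSub tbl (t.drop (pm.1.length - 1))) := by
              rw [pvRegexSub, hf]
          _ = pm.2 ++ pvRegexSub [(p, m)] (pvRegexSub tbl (t.drop (pm.1.length - 1))) := hsk _
          _ = pm.2 ++ pvRegexSub (tbl ++ [(p, m)]) (t.drop (pm.1.length - 1)) := by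
              rw [ih _ hlen']
          _ = pvRegexSub (tbl ++ [(p, m)]) (c :: t) := by
              rw [pvRegexSub, List.find?_append, hf]; rfl
      | none =>
        have hnotbl : ∀ pm ∈ tbl, ¬ pm.1 <+: (c :: t) := by
          intro pm hm hpre
          have := List.find?_eq_none.mp hf pm hm
          simp [List.isPrefixOf_iff_prefix.mpr hpre] at this
        by_cases hpp : p <+: (c :: t)
        · obtain ⟨rest, hxs⟩ := hpp
          match p, hp with
          | p0 :: p', _ =>
            have hx2 : p0 = c ∧ p' ++ rest = t := by simpa using hxs
            obtain ⟨hc, ht⟩ := hx2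
            subst hc
            subst ht
            have hskip : pvRegexSub tbl ((p0 :: p') ++ rest) = (p0 :: p') ++ pvRegexSub tbl rest := by
              apply pvRegexSub_append
              intro j hj pm hm hpre
              rcases Nat.eq_zero_or_pos j with hj0 | hjpos
              · subst hj0
                simp only [List.drop_zero] at hpre
                exact hnotbl pm hm hpre
              · have hok := hPat pm hm
                unfold pvOkPat at hok
                rw [List.all_eq_true] at hok
                have hok' := hok j (by simpa using hj)
                have hjne : (j == 0) = false := by simpa using Nat.pos_iff_ne_zero.mp hjpos
                rw [hjne] at hok'
                simp only [Bool.false_or, Bool.and_eq_true, Bool.not_eq_true'] at hok'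
                rcases pv_prefix_append_cases hpre with h1 | h1
                · have := List.isPrefixOf_iff_prefix.mpr h1
                  rw [hok'.1] at this; exact Bool.false_ne_true this
                · have := List.isPrefixOf_iff_prefix.mpr h1
                  rw [hok'.2] at this; exact Bool.false_ne_true this
            have hrestlen : rest.length ≤ n := by
              simp at hlen; omega
            have hpref1 : ((p0 :: p').isPrefixOf (p0 :: (p' ++ pvRegexSub tbl rest))) = true :=
              List.isPrefixOf_iff_prefix.mpr ⟨pvRegexSub tbl rest, rfl⟩
            have hpref2 : ((p0 :: p').isPrefixOf (p0 :: (p' ++ rest))) = true :=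
              List.isPrefixOf_iff_prefix.mpr ⟨rest, rfl⟩
            calc pvRegexSub [((p0 :: p'), m)] (pvRegexSub tbl (p0 :: (p' ++ rest)))
                = pvRegexSub [((p0 :: p'), m)] ((p0 :: p') ++ pvRegexSub tbl rest) := by
                  rw [show p0 :: (p' ++ rest) = (p0 :: p') ++ rest from rfl, hskip]
              _ = m ++ pvRegexSub [((p0 :: p'), m)] (pvRegexSub tbl rest) := by
                  rw [show ((p0 :: p') ++ pvRegexSub tbl rest)
                        = p0 :: (p' ++ pvRegexSub tbl rest) from rfl]
                  rw [pvRegexSub]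
                  rw [show ([((p0 :: p'), m)].find?
                      (fun pm => pm.1.isPrefixOf (p0 :: (p' ++ pvRegexSub tbl rest))))
                      = some ((p0 :: p'), m) from by simp [List.find?, hpref1]]
                  simp only [List.length_cons, Nat.add_sub_cancel, List.drop_left]
              _ = m ++ pvRegexSub (tbl ++ [((p0 :: p'), m)]) rest := by rw [ih _ hrestlen]
              _ = pvRegexSub (tbl ++ [((p0 :: p'), m)]) (p0 :: (p' ++ rest)) := by
                  rw [pvRegexSub, List.find?_append, hf, Option.none_or]
                  rw [show ([((p0 :: p'), m)].find?
                      (fun pm => pm.1.isPrefixOf (p0 :: (p' ++ rest))))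
                      = some ((p0 :: p'), m) from by simp [List.find?, hpref2]]
                  simp only [List.length_cons, Nat.add_sub_cancel, List.drop_left]
        · have hnpre : ¬ p <+: pvRegexSub tbl (c :: t) := by
            have := pvRegexSub_not_prefix tbl p hTail (c :: t).length (c :: t) le_rfl 0
              (by cases p with
                  | nil => exact absurd rfl hp
                  | cons a b => simp)
              (by simpa using hpp)
            simpa using this
          rw [pvRegexSub, hf] at hnpre ⊢
          have hfind1 : ([(p, m)].find?
              (fun pm => pm.1.isPrefixOf (c :: pvRegexSub tbl t))) = none := by
            rw [List.find?_eq_none]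
            intro pm hm
            have hpm : pm = (p, m) := by simpa using hm
            subst hpm
            simpa [List.isPrefixOf_iff_prefix] using hnpre
          have hfind2 : ((tbl ++ [(p, m)]).find?
              (fun pm => pm.1.isPrefixOf (c :: t))) = none := by
            rw [List.find?_append, hf, Option.none_or, List.find?_eq_none]
            intro pm hm
            have hpm : pm = (p, m) := by simpa using hm
            subst hpm
            simpa [List.isPrefixOf_iff_prefix] using hpp
          rw [pvRegexSub, hfind1, pvRegexSub, hfind2]
          have hlen' : t.length ≤ n := by simp at hlen; omega
          rw [ih t hlen']

-- the fuel loop of PySem.Chars.replace is the single-pattern scan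
theorem pvReplaceGo (p m : List Char) (hp : p ≠ []) :
    ∀ fuel, ∀ (l acc : List Char), l.length ≤ fuel →
      PySem.Chars.replace.go p m fuel l acc = acc.reverse ++ pvRegexSub [(p, m)] l := by
  intro fuel
  induction fuel with
  | zero =>
    intro l acc hlen
    have hl : l = [] := List.eq_nil_of_length_eq_zero (Nat.le_zero.mp hlen)
    subst hl
    simp [PySem.Chars.replace.go, pvRegexSub]
  | succ fuel ih =>
    intro l acc hlen
    match l with
    | [] => simp [PySem.Chars.replace.go, pvRegexSub]
    | c :: t =>
      rw [PySem.Chars.replace.go]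
      by_cases hpp : p.isPrefixOf (c :: t)
      · rw [if_pos hpp]
        match p, hp with
        | p0 :: p', _ =>
          have hdl : List.drop (p0 :: p').length (c :: t) = t.drop p'.length := by
            simp [List.drop_succ_cons]
          rw [hdl]
          rw [ih (t.drop p'.length) _ (by rw [List.length_drop]; simp at hlen; omega)]
          have hfind : ([((p0 :: p'), m)].find?
              (fun pm => pm.1.isPrefixOf (c :: t))) = some ((p0 :: p'), m) := by
            simp [List.find?, hpp]
          rw [pvRegexSub, hfind]
          simp
      · rw [if_neg hpp]
        rw [ih t (c :: acc) (by simp at hlen; omega)]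
        have hfind : ([(p, m)].find? (fun pm => pm.1.isPrefixOf (c :: t))) = none := by
          simp [List.find?, hpp]
        rw [pvRegexSub, hfind]
        simp

theorem pvReplace_eq (s p m : List Char) (hp : p ≠ []) :
    PySem.Chars.replace s p m = pvRegexSub [(p, m)] s := by
  unfold PySem.Chars.replace
  rw [if_neg (by simpa using hp)]
  simpa using pvReplaceGo p m hp s.length s [] le_rfl

-- a chain of replace passes collapses into the scan over the accumulated table
theorem pvChain : ∀ (rest done : List (List Char × List Char)) (cs : List Char),
    pvChainOk done rest = true →
    rest.foldl (fun s pm => PySem.Chars.replace s pm.1 pm.2) (pvRegexSub done cs)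
      = pvRegexSub (done ++ rest) cs := by
  intro rest
  induction rest with
  | nil => intro done cs _; simp
  | cons pm rest' ih =>
    intro done cs h
    unfold pvChainOk at h
    simp only [Bool.and_eq_true] at h
    obtain ⟨⟨hne, hok⟩, hchain⟩ := h
    have hpne : pm.1 ≠ [] := by simpa using hne
    rw [List.foldl_cons]
    rw [pvReplace_eq _ _ _ hpne]
    rw [pvStep done pm.1 pm.2 hpne hok cs.length cs le_rfl]
    rw [show (done ++ [(pm.1, pm.2)]) = done ++ [pm] from by rw [Prod.mk.eta]]
    rw [ih (done ++ [pm]) cs hchain]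
    simp

-- A's String-level fold, seen on the List Char side, is the fold over pvTable's pairs
theorem pvFoldA (abbrs : List String) :
    ∀ t : String,
      (abbrs.foldl (fun temp_text abbr =>
          PySem.Str.replace temp_text abbr (PySem.Str.replace abbr "." "<<DOT>>")) t).toList
        = (abbrs.map (fun a => (a.toList, (PySem.Str.replace a "." "<<DOT>>").toList))).foldl
            (fun s pm => PySem.Chars.replace s pm.1 pm.2) t.toList := by
  induction abbrs with
  | nil => intro t; simp
  | cons a rest ih =>
    intro t
    simp only [List.foldl_cons, List.map_cons]
    rw [ih]
    congr 1
    simp [PySem.Str.replace]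

-- ===== VERDICT (by name: the statement is the Claim_ definition above) =====
theorem handle_abbreviations_spec : Claim_equal_handle_abbreviations := by
  intro text _
  unfold Spec_handle_abbreviations
  apply String.toList_inj.mp
  show (handle_abbreviations text).toList = (handle_abbreviations_alt text).toList
  rw [handle_abbreviations, handle_abbreviations_alt]
  rw [pvFoldA]
  have h := pvChain pvTable [] text.toList (by decide)
  rw [pvRegexSub_nil_tbl, List.nil_append] at h
  rw [show ((["Mr.", "Mrs.", "Ms.", "Dr.", "Prof.",
       "Inc.", "Ltd.", "Co.", "Corp.",
       "i.e.", "e.g.", "etc.", "vs.", "a.m.", "p.m."] : List String).map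
        (fun a => (a.toList, (PySem.Str.replace a "." "<<DOT>>").toList))) = pvTable from rfl]
  rw [h]
  simp
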